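-- pv_equiv track=rewrite | github.com/appletail/algorithm | 로컬 문제 풀이/백준/문자열 폭발.py | solution
-- ===== SOURCE A (Python) =====
-- def solution(string, bomb):
--     stack = []
--     bombLength = len(bomb)
--     for cha in string:
--         stack.append(cha)
--         if stack[-bombLength:] == bomb:
--             for _ in range(bombLength):
--                 stack.pop()
--
--     return "".join(stack) if stack else "FRULA"
-- ===== SOURCE B (Python) =====
-- def solution(string, bomb):
--     # In-place scan with a backtracking index: walk the token list left to
--     # right; whenever the bomb sequence starts at the cursor, splice it out and
--     # step the cursor back just far enough to catch a match created across the
--     # splice point.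
--     tokens = list(string)
--     m = len(bomb)
--     i = 0
--     while i + m <= len(tokens):
--         if tokens[i:i+m] == bomb:
--             tokens = tokens[:i] + tokens[i+m:]
--             i = max(i - m + 1, 0)
--         else:
--             i += 1
--     return "".join(tokens) if tokens else "FRULA"
-- ===== Notes on version B (the rewrite author's own statement) =====
-- stated objective: alternative
-- what changed: B replaces A's push/pop stack with suffix comparison by a single token list scanned in place with a backtracking cursor: when the bomb sequence starts at the cursor it is spliced out of the middle of the list and the cursor steps back m-1 positions, so no stack and no suffix test exist.
import Mathlib
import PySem

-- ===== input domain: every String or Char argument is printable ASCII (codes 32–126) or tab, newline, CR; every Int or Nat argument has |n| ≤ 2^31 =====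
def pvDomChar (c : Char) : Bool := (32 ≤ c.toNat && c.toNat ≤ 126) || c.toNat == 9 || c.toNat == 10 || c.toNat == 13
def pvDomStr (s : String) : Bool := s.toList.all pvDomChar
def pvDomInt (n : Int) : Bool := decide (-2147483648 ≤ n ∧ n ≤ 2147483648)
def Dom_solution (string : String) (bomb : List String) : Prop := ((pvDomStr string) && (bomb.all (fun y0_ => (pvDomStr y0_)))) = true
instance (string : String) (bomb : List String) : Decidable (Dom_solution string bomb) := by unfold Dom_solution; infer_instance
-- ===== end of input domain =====

-- B replaces A's push/pop stack (with its suffix comparison) by one token list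
-- scanned in place with a backtracking cursor that splices matches out of the
-- middle of the list: an alternative algorithm of the same cost.

-- ===== PORT A =====
def solution (string : String) (bomb : List String) : String :=
  let bombLength : Int := PySem.List.len bomb
  let stack : List String :=
    string.toList.foldl (fun stack cha =>
      -- stack.append(cha); then the slice test and, on a match, the pop loop
      if PySem.List.slice (stack ++ [String.ofList [cha]]) (some (-bombLength)) none = bomb then
        -- for _ in range(bombLength): stack.pop()  (pop never raises here: the
        -- matched slice shows the stack holds at least bombLength elements)
        (PySem.List.pyRange 0 bombLength 1).foldl (fun st _ => st.dropLast) (stack ++ [String.ofList [cha]])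
      else stack ++ [String.ofList [cha]]) []
  if stack ≠ [] then PySem.Str.join "" stack else "FRULA"

-- ===== PORT B =====
-- the while loop of Source B. The cursor i is a Python int that stays ≥ 0, kept as
-- a Nat (Nat subtraction i + 1 - m is exactly Python's max(i - m + 1, 0)); the
-- fuel argument only makes the loop total: solution_alt passes
-- 2 * tokens.length + 1, which bounds the loop's step count (each iteration
-- strictly decreases 2 * len(tokens) - i), so the fuel-exhausted branch is
-- never reached.
def solLoop (bomb : List String) : Nat → List String → Nat → List String
  | 0, tokens, _ => tokens
  | fuel + 1, tokens, i =>
    if i + bomb.length ≤ tokens.length then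
      if PySem.List.slice tokens (some (i : Int)) (some ((i : Int) + (bomb.length : Int))) = bomb then
        solLoop bomb fuel
          (PySem.List.slice tokens none (some (i : Int)) ++
           PySem.List.slice tokens (some ((i : Int) + (bomb.length : Int))) none)
          (i + 1 - bomb.length)
      else solLoop bomb fuel tokens (i + 1)
    else tokens

def solution_alt (string : String) (bomb : List String) : String :=
  let tokens : List String := string.toList.map (fun c => String.ofList [c])
  let out : List String := solLoop bomb (2 * tokens.length + 1) tokens 0
  if out ≠ [] then PySem.Str.join "" out else "FRULA"

-- ===== PRECONDITION & SPEC =====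
def Spec_solution (string : String) (bomb : List String) (out : String) : Prop := out = solution_alt string bomb
instance (string : String) (bomb : List String) (out : String) : Decidable (Spec_solution string bomb out) := by unfold Spec_solution; infer_instance

-- ===== CLAIM (what is proved, stated in full; the proofs are below) =====
def Claim_equal_solution : Prop := ∀ (string : String) (bomb : List String), Dom_solution string bomb → Spec_solution string bomb (solution string bomb)

-- ===== LEMMAS AND PROOFS =====

-- clean take/drop forms of the two loops (over the same token lists)

def gStep (bomb : List String) (s : List String) (x : String) : List String :=
  if (s ++ [x]).drop ((s ++ [x]).length - bomb.length) = bomb then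
    (s ++ [x]).take ((s ++ [x]).length - bomb.length)
  else s ++ [x]

def gRun (bomb s ts : List String) : List String := ts.foldl (gStep bomb) s

theorem pvGLoopDec1 (tokens : List String) (m i : Nat) (h : i + m ≤ tokens.length) :
    2 * (tokens.take i ++ tokens.drop (i + m)).length + 1 - (i + 1 - m) < 2 * tokens.length + 1 - i := by
  simp only [List.length_append, List.length_take, List.length_drop]
  omega

theorem pvGLoopDec2 (len i m : Nat) (h : i + m ≤ len) :
    2 * len + 1 - (i + 1) < 2 * len + 1 - i := by omega

def gLoop (bomb : List String) (tokens : List String) (i : Nat) : List String :=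
  if i + bomb.length ≤ tokens.length then
    if (tokens.drop i).take bomb.length = bomb then
      gLoop bomb (tokens.take i ++ tokens.drop (i + bomb.length)) (i + 1 - bomb.length)
    else gLoop bomb tokens (i + 1)
  else tokens
  termination_by 2 * tokens.length + 1 - i
  decreasing_by
  · rename_i hg _
    exact pvGLoopDec1 tokens bomb.length i hg
  · rename_i hg _
    exact pvGLoopDec2 tokens.length i bomb.length hg

-- an occurrence of bomb in l starting at j
def occL (bomb l : List String) (j : Nat) : Prop :=
  j + bomb.length ≤ l.length ∧ (l.drop j).take bomb.length = bomb

-- iterated list.pop() over a range is take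
theorem pvFoldl_dropLast {α β : Type} (l : List β) (xs : List α) :
    l.foldl (fun st _ => st.dropLast) xs = xs.take (xs.length - l.length) := by
  induction l generalizing xs with
  | nil => simp
  | cons a l ih =>
      rw [List.foldl_cons, ih, List.dropLast_eq_take, List.take_take]
      congr 1
      simp only [List.length_take, List.length_cons]
      omega

-- the stack fires on its whole suffix iff bomb occurs ending at the cut point
theorem fire_iff (bomb L : List String) (q : Nat) (hq : q ≤ L.length) :
    ((L.take q).drop ((L.take q).length - bomb.length) = bomb) ↔
      (bomb.length ≤ q ∧ occL bomb L (q - bomb.length)) := by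
  have hlt : (L.take q).length = q := by rw [List.length_take]; omega
  constructor
  · intro hfire
    have hmq : bomb.length ≤ q := by
      by_contra hlt'
      have h0 : q - bomb.length = 0 := by omega
      rw [hlt, h0, List.drop_zero] at hfire
      have hlen := congrArg List.length hfire
      rw [hlt] at hlen
      omega
    refine ⟨hmq, ⟨by omega, ?_⟩⟩
    rw [hlt, List.drop_take, show q - (q - bomb.length) = bomb.length by omega] at hfire
    exact hfire
  · rintro ⟨hmq, ⟨_, hb2⟩⟩
    rw [hlt, List.drop_take, show q - (q - bomb.length) = bomb.length by omega]
    exact hb2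

-- an occurrence wholly inside a prefix is an occurrence of the whole list
theorem occ_take (bomb L : List String) (k j : Nat) (hj : j + bomb.length ≤ k) (hk : k ≤ L.length) :
    occL bomb (L.take k) j ↔ occL bomb L j := by
  have hlt : (L.take k).length = k := by rw [List.length_take]; omega
  have hdt : ((L.take k).drop j).take bomb.length = (L.drop j).take bomb.length := by
    rw [List.drop_take, List.take_take]
    congr 1
    omega
  unfold occL
  rw [hlt, hdt]
  constructor
  · rintro ⟨_, h2⟩; exact ⟨by omega, h2⟩
  · rintro ⟨_, h2⟩; exact ⟨by omega, h2⟩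

theorem solLoop_eq_gLoop_fuel (bomb : List String) :
    ∀ (N : Nat) (tokens : List String) (i : Nat), 2 * tokens.length + 1 - i ≤ N →
      solLoop bomb N tokens i = gLoop bomb tokens i := by
  intro N
  induction N with
  | zero =>
      intro tokens i hN
      have hg : ¬ (i + bomb.length ≤ tokens.length) := by omega
      rw [solLoop, gLoop, if_neg hg]
  | succ N ih =>
      intro tokens i hN
      rw [solLoop, gLoop]
      by_cases hg : i + bomb.length ≤ tokens.length
      · rw [if_pos hg, if_pos hg]
        have hmid : PySem.List.slice tokens (some (i : Int)) (some ((i : Int) + (bomb.length : Int))) = (tokens.drop i).take bomb.length :=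
          PySem.List.slice_natCast_add tokens i bomb.length
        have hto : PySem.List.slice tokens none (some (i : Int)) = tokens.take i :=
          PySem.List.slice_to_natCast tokens i
        have hfrom : PySem.List.slice tokens (some ((i : Int) + (bomb.length : Int))) none = tokens.drop (i + bomb.length) := by
          rw [show ((i : Int) + (bomb.length : Int)) = (((i + bomb.length : Nat)) : Int) by push_cast; ring]
          exact PySem.List.slice_from_natCast tokens (i + bomb.length)
        rw [hmid, hto, hfrom]
        by_cases hc : (tokens.drop i).take bomb.length = bomb
        · rw [if_pos hc, if_pos hc]
          apply ih
          have hlen : (tokens.take i ++ tokens.drop (i + bomb.length)).length = tokens.length - bomb.length := by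
            simp only [List.length_append, List.length_take, List.length_drop]
            omega
          omega
        · rw [if_neg hc, if_neg hc]
          exact ih tokens (i + 1) (by omega)
      · rw [if_neg hg, if_neg hg]

theorem solLoop_eq_gLoop (bomb tokens : List String) (i N : Nat) (hN : 2 * tokens.length + 1 - i ≤ N) :
    solLoop bomb N tokens i = gLoop bomb tokens i :=
  solLoop_eq_gLoop_fuel bomb N tokens i hN

theorem gLoop_nil_fuel :
    ∀ (N : Nat) (tokens : List String) (i : Nat), tokens.length + 1 - i ≤ N →
      gLoop [] tokens i = tokens := by
  intro N
  induction N with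
  | zero =>
      intro tokens i hN
      rw [gLoop]
      rw [if_neg (by simp only [List.length_nil, Nat.add_zero]; omega)]
  | succ N ih =>
      intro tokens i hN
      rw [gLoop]
      by_cases hg : i + ([] : List String).length ≤ tokens.length
      · rw [if_pos hg, if_pos (by simp)]
        simp only [List.length_nil, Nat.add_zero, Nat.sub_zero, List.take_append_drop]
        simp only [List.length_nil, Nat.add_zero] at hg
        exact ih tokens (i + 1) (by omega)
      · rw [if_neg hg]

theorem gLoop_nil_bomb (tokens : List String) (i : Nat) : gLoop [] tokens i = tokens :=
  gLoop_nil_fuel (tokens.length + 1 - i) tokens i le_rfl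

theorem gRun_nil_bomb (s ts : List String) : gRun [] s ts = s ++ ts := by
  induction ts generalizing s with
  | nil => simp [gRun]
  | cons x ts ih =>
      rw [gRun, List.foldl_cons]
      have hstep : gStep [] s x = s ++ [x] := by
        unfold gStep
        simp
      rw [hstep]
      show gRun [] (s ++ [x]) ts = s ++ x :: ts
      rw [ih]
      simp

-- cursor can be marched forward past positions known to carry no occurrence
theorem gLoop_march_fuel (bomb l : List String) (c : Nat)
    (hc : ∀ j < c, ¬ occL bomb l j) :
    ∀ (d i : Nat), c - i ≤ d → i ≤ c → gLoop bomb l i = gLoop bomb l c := by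
  intro d
  induction d with
  | zero =>
      intro i h1 h2
      have : i = c := by omega
      rw [this]
  | succ d ih =>
      intro i h1 h2
      by_cases hic : i = c
      · rw [hic]
      · have hlt : i < c := by omega
        rw [gLoop]
        by_cases hg : i + bomb.length ≤ l.length
        · rw [if_pos hg]
          have hnc : ¬ ((l.drop i).take bomb.length = bomb) := fun hcond => hc i hlt ⟨hg, hcond⟩
          rw [if_neg hnc]
          exact ih (i + 1) (by omega) (by omega)
        · rw [if_neg hg]
          rw [gLoop, if_neg (by omega)]

theorem gLoop_march (bomb l : List String) (c : Nat)
    (hc : ∀ j < c, ¬ occL bomb l j) :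
    ∀ i, i ≤ c → gLoop bomb l i = gLoop bomb l c :=
  fun i hi => gLoop_march_fuel bomb l c hc (c - i) i le_rfl hi

-- no occurrence at all: gLoop returns the list unchanged
theorem gLoop_noOcc_fuel (bomb l : List String) (hm : bomb ≠ [])
    (h : ∀ j, ¬ occL bomb l j) :
    ∀ (N i : Nat), l.length + 1 - i ≤ N → gLoop bomb l i = l := by
  have hm1 : 0 < bomb.length := List.length_pos_iff.mpr hm
  intro N
  induction N with
  | zero =>
      intro i hN
      rw [gLoop, if_neg (by omega)]
  | succ N ih =>
      intro i hN
      rw [gLoop]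
      by_cases hg : i + bomb.length ≤ l.length
      · rw [if_pos hg, if_neg (fun hcond => h i ⟨hg, hcond⟩)]
        exact ih (i + 1) (by omega)
      · rw [if_neg hg]

theorem gLoop_noOcc (bomb l : List String) (hm : bomb ≠ [])
    (h : ∀ j, ¬ occL bomb l j) : gLoop bomb l 0 = l :=
  gLoop_noOcc_fuel bomb l hm h (l.length + 1) 0 le_rfl

-- at the minimal occurrence k, gLoop splices it out
theorem gLoop_splice (bomb l : List String) (k : Nat)
    (hk : occL bomb l k) (hmin : ∀ j < k, ¬ occL bomb l j) :
    gLoop bomb l 0 = gLoop bomb (l.take k ++ l.drop (k + bomb.length)) (k + 1 - bomb.length) := by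
  rw [gLoop_march bomb l k hmin 0 (Nat.zero_le _), gLoop, if_pos hk.1, if_pos hk.2]

-- stack side: no occurrence anywhere means the fold just appends
theorem gRun_noOcc (bomb : List String) :
    ∀ (ts s : List String), (∀ j, ¬ occL bomb (s ++ ts) j) → gRun bomb s ts = s ++ ts := by
  intro ts
  induction ts with
  | nil => intro s _; simp [gRun]
  | cons x ts ih =>
      intro s h
      rw [gRun, List.foldl_cons]
      have hq : s.length + 1 ≤ (s ++ x :: ts).length := by simp
      have htk : (s ++ x :: ts).take (s.length + 1) = s ++ [x] := by
        rw [List.take_append, List.take_of_length_le (l := s) (by omega),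
          show s.length + 1 - s.length = 1 by omega]
        rfl
      have hfire : ¬ ((s ++ [x]).drop ((s ++ [x]).length - bomb.length) = bomb) := by
        intro hf
        rw [← htk] at hf
        exact h _ ((fire_iff bomb (s ++ x :: ts) (s.length + 1) hq).mp hf).2
      have hstep : gStep bomb s x = s ++ [x] := by
        unfold gStep; rw [if_neg hfire]
      rw [hstep]
      show gRun bomb (s ++ [x]) ts = s ++ x :: ts
      have hassoc : (s ++ [x]) ++ ts = s ++ x :: ts := by simp
      rw [ih (s ++ [x]) (by rw [hassoc]; exact h)]
      exact hassoc

-- stack side: march to the first firing push, then pop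
theorem gRun_march (bomb : List String) :
    ∀ (ts1 : List String), ts1 ≠ [] →
      ∀ s : List String,
        (∀ p < ts1.length, ¬ ((s ++ ts1.take p).drop ((s ++ ts1.take p).length - bomb.length) = bomb)) →
        ((s ++ ts1).drop ((s ++ ts1).length - bomb.length) = bomb) →
        ∀ ts2, gRun bomb s (ts1 ++ ts2) =
          gRun bomb ((s ++ ts1).take (s.length + ts1.length - bomb.length)) ts2 := by
  intro ts1
  induction ts1 with
  | nil => intro h; exact absurd rfl h
  | cons x ts1 ih =>
      intro _ s hnof hfire ts2
      by_cases h1 : ts1 = []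
      · subst h1
        rw [List.cons_append, gRun, List.foldl_cons]
        have hstep : gStep bomb s x = (s ++ [x]).take ((s ++ [x]).length - bomb.length) := by
          unfold gStep
          rw [if_pos hfire]
        rw [hstep]
        show gRun bomb ((s ++ [x]).take ((s ++ [x]).length - bomb.length)) ts2 = _
        have hlen : (s ++ [x]).length - bomb.length = s.length + ([x] : List String).length - bomb.length := by
          simp
        rw [hlen]
      · have hl1 : 0 < ts1.length := List.length_pos_iff.mpr h1
        rw [List.cons_append, gRun, List.foldl_cons]
        have hnf : ¬ ((s ++ [x]).drop ((s ++ [x]).length - bomb.length) = bomb) := by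
          have h' := hnof 1 (by simp; omega)
          simpa using h'
        have hstep : gStep bomb s x = s ++ [x] := by unfold gStep; rw [if_neg hnf]
        rw [hstep]
        show gRun bomb (s ++ [x]) (ts1 ++ ts2) = _
        have he : (s ++ [x]) ++ ts1 = s ++ x :: ts1 := by simp
        rw [ih h1 (s ++ [x])
          (by
            intro p hp
            have h' := hnof (p + 1) (by simp; omega)
            have he2 : s ++ (x :: ts1).take (p + 1) = (s ++ [x]) ++ ts1.take p := by
              simp [List.take_succ_cons]
            rw [he2] at h'
            exact h')
          (by rw [he]; exact hfire) ts2]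
        rw [he]
        have hidx : (s ++ [x]).length + ts1.length - bomb.length = s.length + (x :: ts1).length - bomb.length := by
          simp only [List.length_append, List.length_cons, List.length_nil]
          omega
        rw [hidx]

-- MAIN: the stack run equals the cursor loop on the concatenated list
theorem gRun_eq_gLoop (bomb : List String) (hm : bomb ≠ []) :
    ∀ (n : Nat) (s ts : List String), (s ++ ts).length ≤ n →
      (∀ j, ¬ occL bomb s j) → gRun bomb s ts = gLoop bomb (s ++ ts) 0 := by
  have hm1 : 0 < bomb.length := List.length_pos_iff.mpr hm
  intro n
  induction n with
  | zero =>
      intro s ts hn hno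
      rw [List.length_append] at hn
      have hs : s = [] := List.eq_nil_of_length_eq_zero (by omega)
      have ht : ts = [] := List.eq_nil_of_length_eq_zero (by omega)
      subst hs; subst ht
      rw [gRun]
      simp only [List.foldl_nil, List.nil_append]
      rw [gLoop, if_neg (by simp; omega)]
  | succ n ih =>
      intro s ts hn hno
      haveI : DecidablePred (occL bomb (s ++ ts)) := fun j => by unfold occL; infer_instance
      by_cases hex : ∃ j, occL bomb (s ++ ts) j
      · obtain ⟨k, hk, hmin⟩ : ∃ k, occL bomb (s ++ ts) k ∧ ∀ j < k, ¬ occL bomb (s ++ ts) j :=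
          ⟨Nat.find hex, Nat.find_spec hex, fun j hj => Nat.find_min hex hj⟩
        clear hex
        set L := s ++ ts with hL
        have hkm : k + bomb.length ≤ L.length := hk.1
        have hLlen : L.length = s.length + ts.length := by rw [hL, List.length_append]
        -- the first occurrence ends strictly beyond s
        have hse : s.length < k + bomb.length := by
          by_contra hle
          have hle' : k + bomb.length ≤ s.length := by omega
          apply hno k
          refine ⟨hle', ?_⟩
          have hdrop : L.drop k = s.drop k ++ ts := by
            rw [hL, List.drop_append, show k - s.length = 0 by omega, List.drop_zero]
          have htk : (L.drop k).take bomb.length = (s.drop k).take bomb.length := by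
            rw [hdrop, List.take_append,
              show bomb.length - (s.drop k).length = 0 by rw [List.length_drop]; omega,
              List.take_zero, List.append_nil]
          rw [← htk]
          exact hk.2
        have hlts1 : (ts.take (k + bomb.length - s.length)).length = k + bomb.length - s.length := by
          rw [List.length_take]; omega
        have hts1ne : ts.take (k + bomb.length - s.length) ≠ [] := by
          intro h0
          rw [h0] at hlts1
          simp at hlts1
          omega
        have hstake : s ++ ts.take (k + bomb.length - s.length) = L.take (k + bomb.length) := by
          rw [hL, List.take_append, List.take_of_length_le (l := s) (by omega)]
        have hfiree : (s ++ ts.take (k + bomb.length - s.length)).drop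
            ((s ++ ts.take (k + bomb.length - s.length)).length - bomb.length) = bomb := by
          rw [hstake]
          refine (fire_iff bomb L (k + bomb.length) (by omega)).mpr ⟨by omega, ?_⟩
          rw [show k + bomb.length - bomb.length = k by omega]
          exact hk
        have hnof : ∀ p < (ts.take (k + bomb.length - s.length)).length,
            ¬ ((s ++ (ts.take (k + bomb.length - s.length)).take p).drop
                ((s ++ (ts.take (k + bomb.length - s.length)).take p).length - bomb.length) = bomb) := by
          intro p hp hfire
          rw [hlts1] at hp
          have hsp : s ++ (ts.take (k + bomb.length - s.length)).take p = L.take (s.length + p) := by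
            rw [hL, List.take_append, List.take_of_length_le (l := s) (by omega)]
            congr 1
            rw [List.take_take]
            congr 1
            omega
          rw [hsp] at hfire
          have hocc := (fire_iff bomb L (s.length + p) (by omega)).mp hfire
          exact hmin (s.length + p - bomb.length) (by omega) hocc.2
        -- left side: march to the first pop, then recurse
        have hrun : gRun bomb s ts = gRun bomb (L.take k) (ts.drop (k + bomb.length - s.length)) := by
          conv_lhs => rw [show ts = ts.take (k + bomb.length - s.length) ++ ts.drop (k + bomb.length - s.length) from (List.take_append_drop _ _).symm]
          rw [gRun_march bomb _ hts1ne s hnof hfiree _]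
          congr 1
          rw [hstake, List.take_take]
          congr 1
          omega
        have hts2L : ts.drop (k + bomb.length - s.length) = L.drop (k + bomb.length) := by
          rw [hL, List.drop_append, List.drop_of_length_le (l := s) (by omega), List.nil_append]
        have hnos2 : ∀ j, ¬ occL bomb (L.take k) j := by
          intro j hocc
          have hjk : j + bomb.length ≤ k := by
            have h1 := hocc.1
            rw [List.length_take] at h1
            omega
          exact hmin j (by omega) ((occ_take bomb L k j hjk (by omega)).mp hocc)
        have hlen2 : (L.take k ++ ts.drop (k + bomb.length - s.length)).length ≤ n := by
          rw [List.length_append, List.length_take, hts2L, List.length_drop]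
          omega
        have hih := ih (L.take k) (ts.drop (k + bomb.length - s.length)) hlen2 hnos2
        -- right side: splice at the minimal occurrence, then march the cursor back to 0
        have hsplice : gLoop bomb L 0 = gLoop bomb (L.take k ++ L.drop (k + bomb.length)) (k + 1 - bomb.length) :=
          gLoop_splice bomb L k hk hmin
        have hnoM : ∀ j < k + 1 - bomb.length, ¬ occL bomb (L.take k ++ L.drop (k + bomb.length)) j := by
          intro j hj hocc
          have hjk : j + bomb.length ≤ k := by omega
          have hkM : k ≤ (L.take k ++ L.drop (k + bomb.length)).length := by
            rw [List.length_append, List.length_take]; omega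
          have hMT : (L.take k ++ L.drop (k + bomb.length)).take k = L.take k := by
            rw [List.take_append,
              show k - (L.take k).length = 0 by rw [List.length_take]; omega,
              List.take_zero, List.append_nil, List.take_take]
            congr 1
            omega
          have h2 := (occ_take bomb (L.take k ++ L.drop (k + bomb.length)) k j hjk hkM).mpr hocc
          rw [hMT] at h2
          exact hnos2 j h2
        have hmarch : gLoop bomb (L.take k ++ L.drop (k + bomb.length)) 0 = gLoop bomb (L.take k ++ L.drop (k + bomb.length)) (k + 1 - bomb.length) :=
          gLoop_march bomb _ (k + 1 - bomb.length) hnoM 0 (Nat.zero_le _)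
        rw [hrun, hih, hts2L, hmarch, hsplice]
      · rw [not_exists] at hex
        rw [gRun_noOcc bomb ts s hex]
        exact (gLoop_noOcc bomb (s ++ ts) hm hex).symm

-- A's fold step is gStep
theorem astep_eq_gstep (bomb s : List String) (c : Char) :
    (if PySem.List.slice (s ++ [String.ofList [c]]) (some (-(PySem.List.len bomb))) none = bomb then
      (PySem.List.pyRange 0 (PySem.List.len bomb) 1).foldl (fun st _ => st.dropLast) (s ++ [String.ofList [c]])
    else s ++ [String.ofList [c]]) = gStep bomb s (String.ofList [c]) := by
  by_cases hb : bomb = []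
  · subst hb
    unfold gStep
    simp [PySem.List.len_eq]
  · have hm1 : 0 < bomb.length := List.length_pos_iff.mpr hb
    unfold gStep
    rw [PySem.List.len_eq, PySem.List.slice_from_neg_natCast _ _ hm1,
      PySem.List.pyRange_zero_natCast, pvFoldl_dropLast]
    rw [List.length_map, List.length_range]

-- ===== VERDICT (by name: the statement is the Claim_ definition above) =====
theorem solution_spec : Claim_equal_solution := by
  intro string bomb _
  unfold Spec_solution
  show solution string bomb = solution_alt string bomb
  simp only [solution, solution_alt]
  have hfun : (fun (stack : List String) (cha : Char) =>
      if PySem.List.slice (stack ++ [String.ofList [cha]]) (some (-(PySem.List.len bomb))) none = bomb then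
        (PySem.List.pyRange 0 (PySem.List.len bomb) 1).foldl (fun st _ => st.dropLast) (stack ++ [String.ofList [cha]])
      else stack ++ [String.ofList [cha]])
      = fun (stack : List String) (cha : Char) => gStep bomb stack (String.ofList [cha]) := by
    funext s c
    exact astep_eq_gstep bomb s c
  rw [hfun]
  have hrun : string.toList.foldl (fun s c => gStep bomb s (String.ofList [c])) [] =
      gRun bomb [] (string.toList.map (fun c => String.ofList [c])) := by
    rw [gRun, List.foldl_map]
  rw [hrun, solLoop_eq_gLoop _ _ _ _ (by omega)]
  by_cases hb : bomb = []
  · subst hb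
    rw [gRun_nil_bomb, gLoop_nil_bomb, List.nil_append]
  · rw [gRun_eq_gLoop bomb hb ((([] : List String) ++ string.toList.map (fun c => String.ofList [c])).length)
      [] (string.toList.map (fun c => String.ofList [c])) le_rfl
      (by
        intro j hocc
        have h1 := hocc.1
        have h2 := List.length_pos_iff.mpr hb
        simp only [List.length_nil] at h1
        omega),
      List.nil_append]
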